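-- pv_equiv track=rewrite | github.com/augustocardoso07/learning | Code Challenges/uri/1107 - Escultura à Laser/uri1107.py | solve_slow
-- ===== SOURCE A (Python) =====
-- def solve_slow(a, c, final):
--     result = 0
--     for altura in range(a, -1, -1):
--         ligado = False
--         for i in range(c):
--             if final[i] < altura:
--                 if not ligado:
--                     result += 1
--                 ligado = True
--             else:
--                 ligado = False
--     return result
-- ===== SOURCE B (Python) =====
-- def solve_slow(a, c, final):
--     # One pass over the columns: for each column, count in closed form the
--     # heights altura in 0..a at which a new run starts there, i.e. the
--     # heights with final[i] < altura <= min(a, previous column's height).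
--     result = 0
--     prev = a
--     for i in range(c):
--         x = final[i]
--         result += max(0, min(a, prev) - max(x, -1))
--         prev = x
--     return result
-- ===== Notes on version B (the rewrite author's own statement) =====
-- stated objective: faster
-- what changed: Replaces the double loop over all heights 0..a and all columns by a single pass over the columns that adds, per column, the closed-form count max(0, min(a, prev) - max(final[i], -1)) of heights at which a run starts there.
-- outside the precondition, e.g. on solve_slow(-1, 5, []): A returns 0, B raises IndexError
import Mathlib
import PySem

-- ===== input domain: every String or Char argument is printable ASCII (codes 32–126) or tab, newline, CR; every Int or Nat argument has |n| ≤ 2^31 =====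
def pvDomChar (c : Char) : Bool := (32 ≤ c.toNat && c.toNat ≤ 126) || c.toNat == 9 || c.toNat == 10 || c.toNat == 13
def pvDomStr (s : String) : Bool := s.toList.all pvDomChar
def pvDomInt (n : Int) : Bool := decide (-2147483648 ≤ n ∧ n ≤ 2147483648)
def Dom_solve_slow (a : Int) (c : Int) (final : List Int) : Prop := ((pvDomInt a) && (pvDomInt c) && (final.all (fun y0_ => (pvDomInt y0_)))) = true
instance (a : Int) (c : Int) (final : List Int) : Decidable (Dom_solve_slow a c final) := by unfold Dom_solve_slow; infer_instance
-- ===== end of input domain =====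

-- B replaces A's double loop over heights and columns by a single pass over the
-- columns with a per-column closed-form count (objective: faster, O(c) vs O(a*c)).

-- ===== PORT A =====
-- pyGetD with default 0: Pre_ guarantees every index read is in range.
def solve_slow (a : Int) (c : Int) (final : List Int) : Int :=
  (PySem.List.pyRange a (-1) (-1)).foldl (fun result altura =>
    ((PySem.List.pyRange 0 c 1).foldl (fun (st : Int × Bool) i =>
        if PySem.List.pyGetD final i 0 < altura then
          (if st.2 then st.1 else st.1 + 1, true)
        else
          (st.1, false)) (result, false)).1) 0

-- ===== PORT B =====
def solve_slow_alt (a : Int) (c : Int) (final : List Int) : Int :=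
  ((PySem.List.pyRange 0 c 1).foldl (fun (st : Int × Int) i =>
      (st.1 + max 0 (min a st.2 - max (PySem.List.pyGetD final i 0) (-1)),
        PySem.List.pyGetD final i 0)) (0, a)).1

-- ===== PRECONDITION & SPEC =====
-- Pre_ excludes c > len(final): there A raises IndexError whenever a ≥ 0, and
-- returns 0 only accidentally when a < 0 (the height loop never runs); B's
-- column loop raises there as well unless a < 0 masks it.
def Pre_solve_slow (a : Int) (c : Int) (final : List Int) : Prop :=
  c ≤ (final.length : Int)
instance (a : Int) (c : Int) (final : List Int) : Decidable (Pre_solve_slow a c final) := by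
  unfold Pre_solve_slow; infer_instance

def pvWitness_solve_slow : Int × Int × List Int := (3, 4, [1, 0, 2, 0])

def Spec_solve_slow (a : Int) (c : Int) (final : List Int) (out : Int) : Prop := out = solve_slow_alt a c final
instance (a : Int) (c : Int) (final : List Int) (out : Int) : Decidable (Spec_solve_slow a c final out) := by unfold Spec_solve_slow; infer_instance

-- ===== CLAIM (what is proved, stated in full; the proofs are below) =====
def Claim_equal_solve_slow : Prop := ∀ (a : Int) (c : Int) (final : List Int), Dom_solve_slow a c final → Pre_solve_slow a c final → Spec_solve_slow a c final (solve_slow a c final)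

-- ===== LEMMAS AND PROOFS =====

-- number of runs of values < h in xs, given whether the previous column was < h
def pvRuns (h : Int) (lig : Bool) : List Int → Int
  | [] => 0
  | x :: t => if x < h then (if lig then 0 else 1) + pvRuns h true t else pvRuns h false t

-- same, with the previous column's VALUE p instead of the boolean p < h
def pvRunsP (h p : Int) : List Int → Int
  | [] => 0
  | x :: t => (if x < h ∧ ¬ p < h then 1 else 0) + pvRunsP h x t

-- B's per-column closed-form accumulation
def pvFoldB (a p : Int) : List Int → Int
  | [] => 0
  | x :: t => max 0 (min a p - max x (-1)) + pvFoldB a x t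

theorem pvInnerA_eq (h : Int) (xs : List Int) : ∀ (r : Int) (b : Bool),
    (xs.foldl (fun (st : Int × Bool) x =>
        if x < h then (if st.2 then st.1 else st.1 + 1, true) else (st.1, false)) (r, b)).1
      = r + pvRuns h b xs := by
  induction xs with
  | nil => intro r b; simp [pvRuns]
  | cons x t ih =>
      intro r b
      simp only [List.foldl_cons, pvRuns]
      by_cases hx : x < h
      · simp only [hx, if_true]
        cases b <;> simp [ih] <;> ring
      · simp [hx, ih]

theorem pvRuns_eq_runsP (h : Int) (xs : List Int) : ∀ (p : Int),
    pvRuns h (decide (p < h)) xs = pvRunsP h p xs := by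
  induction xs with
  | nil => intro p; simp [pvRuns, pvRunsP]
  | cons x t ih =>
      intro p
      simp only [pvRuns, pvRunsP]
      by_cases hx : x < h
      · by_cases hp : p < h <;> simp [hx, hp, ← ih x]
      · by_cases hp : p < h <;> simp [hx, hp, ← ih x]

-- counting heights k ∈ [0, n) with x < k ≤ p, in closed form
theorem pvCount (x p : Int) : ∀ (n : Nat),
    (((List.range n).map (fun k : Nat => if x < (k : Int) ∧ ¬ p < (k : Int) then (1 : Int) else 0)).sum)
      = max 0 (min ((n : Int) - 1) p - max x (-1)) := by
  intro n
  induction n with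
  | zero => simp
  | succ m ih =>
      rw [List.range_succ, List.map_append, List.sum_append]
      simp only [List.map_cons, List.map_nil, List.sum_cons, List.sum_nil]
      rw [ih]
      push_cast
      split_ifs with hc <;> omega

theorem pvSum_runsP (a : Int) (xs : List Int) : ∀ (p : Int),
    (((PySem.List.pyRange a (-1) (-1)).map (fun h => pvRunsP h p xs)).sum)
      = pvFoldB a p xs := by
  induction xs with
  | nil =>
      intro p
      simp [pvRunsP, pvFoldB]
  | cons x t ih =>
      intro p
      simp only [pvRunsP, pvFoldB]
      rw [PySem.List.sum_map_add_int, ih x]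
      congr 1
      have e0 : (-1 : Int) + 1 = 0 := by norm_num
      rw [PySem.List.pyRange_neg_one_eq_reverse, List.map_reverse, List.sum_reverse, e0,
          PySem.List.pyRange_one 0 (a + 1), List.map_map]
      have hc : ((fun h => if x < h ∧ ¬ p < h then (1 : Int) else 0) ∘ fun k : Nat => (0 : Int) + ↑k)
          = fun k : Nat => if x < (k : Int) ∧ ¬ p < (k : Int) then (1 : Int) else 0 := by
        funext k; simp
      rw [hc, pvCount x p]
      have h3 : (((a + 1 - 0).toNat : Int)) = max (a + 1) 0 := by omega
      omega

theorem pvFoldB_eq (a : Int) (xs : List Int) : ∀ (r p : Int),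
    (xs.foldl (fun (st : Int × Int) x =>
        (st.1 + max 0 (min a st.2 - max x (-1)), x)) (r, p)).1
      = r + pvFoldB a p xs := by
  induction xs with
  | nil => intro r p; simp [pvFoldB]
  | cons x t ih =>
      intro r p
      simp only [List.foldl_cons, pvFoldB, ih]
      ring

-- pyGetD on a prefix agrees with pyGetD on the full list for indices below the cut
theorem pvGetD_take (l : List Int) (n : Nat) (j : Int) (h0 : 0 ≤ j) (hj : j < (n : Int))
    (hn : (n : Int) ≤ (l.length : Int)) :
    PySem.List.pyGetD (l.take n) j 0 = PySem.List.pyGetD l j 0 := by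
  have hjn : j.toNat < n := by omega
  have hlen : (l.take n).length = n := by
    rw [List.length_take]; omega
  rw [PySem.List.pyGetD_eq_getElem _ _ h0 (by rw [hlen]; exact_mod_cast hj),
      PySem.List.pyGetD_eq_getElem _ _ h0 (by omega)]
  exact List.getElem_take

-- ===== VERDICT (by name: the statement is the Claim_ definition above) =====
theorem solve_slow_spec : Claim_equal_solve_slow := by
  intro a c final _hd hpre
  unfold Spec_solve_slow solve_slow solve_slow_alt Pre_solve_slow at *
  set xs : List Int := final.take c.toNat with hxs
  have hxlen : (xs.length : Int) = c.toNat := by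
    rw [hxs, List.length_take]
    have : c.toNat ≤ final.length := by omega
    omega
  -- the index range is the same as the range over xs's length
  have hrange : PySem.List.pyRange 0 c 1 = PySem.List.pyRange 0 (xs.length : Int) 1 := by
    rw [PySem.List.pyRange_one, PySem.List.pyRange_one, hxlen]
    congr 2
    omega
  -- replace reads of final by reads of xs inside both folds
  have hget : ∀ j ∈ PySem.List.pyRange 0 c 1,
      PySem.List.pyGetD final j 0 = PySem.List.pyGetD xs j 0 := by
    intro j hj
    rw [PySem.List.mem_pyRange_one] at hj
    exact (pvGetD_take final c.toNat j hj.1 (by omega) (by omega)).symm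
  -- B side
  have hB : ((PySem.List.pyRange 0 c 1).foldl (fun (st : Int × Int) i =>
        (st.1 + max 0 (min a st.2 - max (PySem.List.pyGetD final i 0) (-1)),
          PySem.List.pyGetD final i 0)) (0, a)).1 = pvFoldB a a xs := by
    rw [PySem.List.foldl_congr_mem (PySem.List.pyRange 0 c 1) _
        (fun (st : Int × Int) i =>
          (st.1 + max 0 (min a st.2 - max (PySem.List.pyGetD xs i 0) (-1)),
            PySem.List.pyGetD xs i 0)) (0, a)
        (by intro acc x hx; rw [hget x hx]), hrange,
       PySem.List.foldl_pyRange_zero_pyGetD' xs 0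
         (fun (st : Int × Int) x => (st.1 + max 0 (min a st.2 - max x (-1)), x)) (0, a)]
    simpa using pvFoldB_eq a xs 0 a
  -- A side
  have hInner : ∀ (altura r : Int),
      ((PySem.List.pyRange 0 c 1).foldl (fun (st : Int × Bool) i =>
          if PySem.List.pyGetD final i 0 < altura then
            (if st.2 then st.1 else st.1 + 1, true)
          else (st.1, false)) (r, false)).1 = r + pvRuns altura false xs := by
    intro altura r
    rw [PySem.List.foldl_congr_mem (PySem.List.pyRange 0 c 1) _
        (fun (st : Int × Bool) i =>
          if PySem.List.pyGetD xs i 0 < altura then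
            (if st.2 then st.1 else st.1 + 1, true)
          else (st.1, false)) (r, false)
        (by intro acc x hx; rw [hget x hx]), hrange,
       PySem.List.foldl_pyRange_zero_pyGetD' xs 0
         (fun (st : Int × Bool) x =>
           if x < altura then (if st.2 then st.1 else st.1 + 1, true) else (st.1, false))
         (r, false)]
    exact pvInnerA_eq altura xs r false
  have hA : (PySem.List.pyRange a (-1) (-1)).foldl (fun result altura =>
        ((PySem.List.pyRange 0 c 1).foldl (fun (st : Int × Bool) i =>
            if PySem.List.pyGetD final i 0 < altura then
              (if st.2 then st.1 else st.1 + 1, true)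
            else (st.1, false)) (result, false)).1) 0
      = ((PySem.List.pyRange a (-1) (-1)).map (fun h => pvRunsP h a xs)).sum := by
    rw [PySem.List.foldl_congr_mem (PySem.List.pyRange a (-1) (-1)) _
        (fun result altura => result + pvRunsP altura a xs) 0
        (by
          intro acc h hh
          rw [PySem.List.mem_pyRange_neg_one] at hh
          rw [hInner h acc]
          congr 1
          have : (decide (a < h)) = false := by simp; omega
          rw [← pvRuns_eq_runsP h xs a, this]),
       PySem.List.foldl_add]
    simp
  rw [hA, hB, pvSum_runsP a xs a]
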